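-- pv_equiv track=rewrite | github.com/jjhangu/algopython | codefights/helico.py | helptoclone
-- ===== SOURCE A (Python) =====
-- def helptoclone(A):
--     c=0
--     t=0
--
--     for i in A:
--         if i %2==0:
--             c += 1
--             t += c
--
--     return len(A)*c-t
-- ===== SOURCE B (Python) =====
-- def helptoclone(A):
--     c = sum(1 for i in A if i % 2 == 0)
--     return len(A)*c - c*(c+1)//2
-- ===== Notes on version B (the rewrite author's own statement) =====
-- stated objective: simpler
-- what changed: Replaces the running-sum accumulator t (which equals the triangular number c(c+1)/2) with the closed form len(A)*c - c*(c+1)//2 computed from a single even-count.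
import Mathlib
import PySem

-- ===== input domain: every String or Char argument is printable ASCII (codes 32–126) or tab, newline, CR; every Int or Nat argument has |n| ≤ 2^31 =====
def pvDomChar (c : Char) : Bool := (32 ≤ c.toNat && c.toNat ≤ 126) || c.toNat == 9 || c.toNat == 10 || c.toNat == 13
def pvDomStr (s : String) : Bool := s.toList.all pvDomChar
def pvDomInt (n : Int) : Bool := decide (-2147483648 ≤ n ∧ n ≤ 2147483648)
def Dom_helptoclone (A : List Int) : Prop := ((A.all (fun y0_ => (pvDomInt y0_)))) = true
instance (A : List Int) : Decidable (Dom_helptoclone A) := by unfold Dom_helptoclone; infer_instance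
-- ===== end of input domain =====

-- B replaces A's running-sum accumulator t (a triangular number) with the closed form
-- len(A)*c - c*(c+1)//2 computed from a single even-count (objective: simpler).

-- ===== PORT A =====
def helptoclone (A : List Int) : Int :=
  let st := A.foldl (fun (ct : Int × Int) i =>
    if PySem.Int.mod i 2 == 0 then (ct.1 + 1, ct.2 + (ct.1 + 1)) else ct) (0, 0)
  (A.length : Int) * st.1 - st.2

-- ===== PORT B =====
def helptoclone_alt (A : List Int) : Int :=
  let c : Int := ((A.countP (fun i => PySem.Int.mod i 2 == 0) : Nat) : Int)
  (A.length : Int) * c - PySem.Int.floordiv (c * (c + 1)) 2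

-- ===== PRECONDITION & SPEC =====
def Spec_helptoclone (A : List Int) (out : Int) : Prop := out = helptoclone_alt A
instance (A : List Int) (out : Int) : Decidable (Spec_helptoclone A out) := by unfold Spec_helptoclone; infer_instance

-- ===== CLAIM (what is proved, stated in full; the proofs are below) =====
def Claim_equal_helptoclone : Prop := ∀ (A : List Int), Dom_helptoclone A → Spec_helptoclone A (helptoclone A)

-- ===== LEMMAS AND PROOFS =====

-- Loop invariant: from a state (c, t) with 2*t = c*(c+1), A's loop ends with
-- first component c + (number of evens) and second component the matching triangular number.
lemma helptoclone_fold (A : List Int) (c t : Int) (ht : 2 * t = c * (c + 1)) :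
    (A.foldl (fun (ct : Int × Int) i =>
      if PySem.Int.mod i 2 == 0 then (ct.1 + 1, ct.2 + (ct.1 + 1)) else ct) (c, t)).1
      = c + ((A.countP (fun i => PySem.Int.mod i 2 == 0) : Nat) : Int)
    ∧ 2 * (A.foldl (fun (ct : Int × Int) i =>
      if PySem.Int.mod i 2 == 0 then (ct.1 + 1, ct.2 + (ct.1 + 1)) else ct) (c, t)).2
      = (c + ((A.countP (fun i => PySem.Int.mod i 2 == 0) : Nat) : Int))
        * (c + ((A.countP (fun i => PySem.Int.mod i 2 == 0) : Nat) : Int) + 1) := by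
  induction A generalizing c t with
  | nil => simpa using ht
  | cons x xs ih =>
    simp only [List.foldl_cons, List.countP_cons]
    by_cases hx : (PySem.Int.mod x 2 == 0) = true
    · have := ih (c + 1) (t + (c + 1)) (by ring_nf; linarith)
      simp only [hx, if_pos]
      refine ⟨?_, ?_⟩
      · rw [this.1]; push_cast; ring
      · rw [this.2]; push_cast; ring
    · have := ih c t ht
      simp only [hx, if_neg, Bool.false_eq_true, not_false_iff]
      simpa [hx] using this

theorem helptoclone_spec : Claim_equal_helptoclone := by
  intro A _
  unfold Spec_helptoclone helptoclone helptoclone_alt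
  obtain ⟨h1, h2⟩ := helptoclone_fold A 0 0 (by ring)
  simp only [zero_add] at h1 h2
  show (A.length : Int) * (A.foldl (fun (ct : Int × Int) i =>
      if PySem.Int.mod i 2 == 0 then (ct.1 + 1, ct.2 + (ct.1 + 1)) else ct) (0, 0)).1
    - (A.foldl (fun (ct : Int × Int) i =>
      if PySem.Int.mod i 2 == 0 then (ct.1 + 1, ct.2 + (ct.1 + 1)) else ct) (0, 0)).2
    = (A.length : Int) * ((A.countP (fun i => PySem.Int.mod i 2 == 0) : Nat) : Int)
      - PySem.Int.floordiv (((A.countP (fun i => PySem.Int.mod i 2 == 0) : Nat) : Int) *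
        (((A.countP (fun i => PySem.Int.mod i 2 == 0) : Nat) : Int) + 1)) 2
  rw [h1]
  have hfd : PySem.Int.floordiv
      (((A.countP (fun i => PySem.Int.mod i 2 == 0) : Nat) : Int) *
       (((A.countP (fun i => PySem.Int.mod i 2 == 0) : Nat) : Int) + 1)) 2
      = (A.foldl (fun (ct : Int × Int) i =>
          if PySem.Int.mod i 2 == 0 then (ct.1 + 1, ct.2 + (ct.1 + 1)) else ct) (0, 0)).2 := by
    rw [PySem.Int.floordiv_eq_ediv_of_pos (by norm_num), ← h2]
    omega
  rw [hfd]
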